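-- pv_equiv track=rewrite | github.com/ndgnuh/KIE | kie/graph_utils.py | get_dfs_sequence
-- ===== SOURCE A (Python) =====
-- def get_dfs_sequence(start: int, links: list):
--     sequence = [start]  # Khởi tạo chuỗi với số bắt đầu
--
--     current_number = start  # Số hiện tại trong chuỗi
--     found_match = True
--     while found_match:
--         found_match = False
--         # Tìm số sau của cặp [số trước, số sau] trong input
--         for pair in links:
--             if pair[0] == current_number:
--                 next_number = pair[1]
--                 found_match = True
--                 sequence.append(next_number)  # Thêm số sau vào chuỗi
--                 current_number = next_number  # Cập nhật số hiện tại
--                 break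
--
--     return sequence
-- ===== SOURCE B (Python) =====
-- def get_dfs_sequence(start, links):
--     # Recursive peeling: once a node is visited, all of its out-edges are deleted
--     # from the edge list, and the rest of the chain is computed on the smaller list.
--     # Correct wherever A returns: A's chain never revisits a node (a revisit would
--     # make A's while-loop spin forever), so deleted edges can never be needed again.
--     for pair in links:
--         if pair[0] == start:
--             rest = [p for p in links if p[0] != start]
--             return [start] + get_dfs_sequence(pair[1], rest)
--     return [start]
-- ===== Notes on version B (the rewrite author's own statement) =====
-- stated objective: alternative
-- what changed: B is a recursive peeling algorithm: each step deletes every out-edge of the visited node and recurses on the strictly smaller edge list, so it terminates structurally with no found-match flag and no rescans of consumed edges, instead of A's while-loop that rescans the full list each step.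
import Mathlib
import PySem

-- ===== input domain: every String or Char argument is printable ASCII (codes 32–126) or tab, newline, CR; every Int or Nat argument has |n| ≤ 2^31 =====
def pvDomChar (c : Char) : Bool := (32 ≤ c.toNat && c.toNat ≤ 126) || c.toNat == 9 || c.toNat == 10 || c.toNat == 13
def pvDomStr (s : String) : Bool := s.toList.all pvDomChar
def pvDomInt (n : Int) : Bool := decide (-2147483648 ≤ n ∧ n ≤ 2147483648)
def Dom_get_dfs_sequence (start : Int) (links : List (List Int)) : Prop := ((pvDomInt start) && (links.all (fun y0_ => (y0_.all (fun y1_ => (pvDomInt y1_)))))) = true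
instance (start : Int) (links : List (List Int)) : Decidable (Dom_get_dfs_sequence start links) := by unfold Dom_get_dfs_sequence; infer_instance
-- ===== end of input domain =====

-- B replaces A's while-loop (which rescans the full edge list every step) by a recursive
-- peeling algorithm: each step deletes all out-edges of the visited node and recurses on
-- the strictly smaller list, terminating structurally (objective: alternative).

-- ===== PORT A =====
-- the inner `for pair in links: if pair[0] == current: … break` loop
def pvScanA (cur : Int) : List (List Int) → Option (List Int)
  | [] => none
  | p :: rest => if PySem.List.pyGetD p 0 0 = cur then some p else pvScanA cur rest

-- the outer `while found_match` loop; inside Pre_ the chain exits within links.length steps,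
-- so this fuel suffices
def pvLoopA (links : List (List Int)) : Nat → Int → List Int → List Int
  | 0, _, seq => seq
  | fuel+1, cur, seq =>
    match pvScanA cur links with
    | none => seq
    | some p =>
        let nxt := PySem.List.pyGetD p 1 0
        pvLoopA links fuel nxt (seq ++ [nxt])

def get_dfs_sequence (start : Int) (links : List (List Int)) : List Int :=
  pvLoopA links (links.length + 1) start [start]

-- ===== PORT B =====
-- `for pair in links: if pair[0] == start: …` first-match loop, then the list
-- comprehension `[p for p in links if p[0] != start]` and the recursive call
def get_dfs_sequence_alt (start : Int) (links : List (List Int)) : List Int :=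
  match h : links.find? (fun p => PySem.List.pyGetD p 0 0 == start) with
  | none => [start]
  | some p =>
      start :: get_dfs_sequence_alt (PySem.List.pyGetD p 1 0)
        (links.filter (fun q => ¬ (PySem.List.pyGetD q 0 0 == start)))
termination_by links.length
decreasing_by
  have hp : p ∈ links := List.mem_of_find?_eq_some h
  have hph : (PySem.List.pyGetD p 0 0 == start) = true := by
    simpa using List.find?_some (p := fun q => PySem.List.pyGetD q 0 0 == start) h
  simp only [List.length_unattach]
  refine Nat.lt_of_lt_of_eq
    (List.length_filter_lt_length_iff_exists.mpr ⟨⟨p, hp⟩, List.mem_attach _ _, ?_⟩)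
    List.length_attach
  simp [hph]

-- ===== PRECONDITION & SPEC =====
-- first pair whose head equals cur (the pair A's inner loop matches)
def pvFirstPre (links : List (List Int)) (cur : Int) : Option (List Int) :=
  links.find? (fun p => p.headI == cur)

-- one chain step (identity when the chain has left the keys or the matched pair is short)
def pvStepPre (links : List (List Int)) (cur : Int) : Int :=
  match pvFirstPre links cur with
  | some (_ :: b :: _) => b
  | _ => cur

-- Pre_ excludes exactly the inputs on which the Python A does not return: an empty pair
-- (IndexError on pair[0] in the final full scan), a matched pair of length 1 (IndexError
-- on pair[1]) — B raises there too — and chains that cycle, on which A never terminates.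
def Pre_get_dfs_sequence (start : Int) (links : List (List Int)) : Prop :=
  (∀ p ∈ links, p ≠ []) ∧
  (∀ m ∈ List.range (links.length + 1),
     ∀ p ∈ (pvFirstPre links ((pvStepPre links)^[m] start)).toList, 2 ≤ p.length) ∧
  (∃ m ∈ List.range (links.length + 1),
     pvFirstPre links ((pvStepPre links)^[m] start) = none)

instance (start : Int) (links : List (List Int)) : Decidable (Pre_get_dfs_sequence start links) := by
  unfold Pre_get_dfs_sequence; infer_instance

def pvWitness_get_dfs_sequence : Int × List (List Int) := (0, [[0, 1], [1, 2]])

def Spec_get_dfs_sequence (start : Int) (links : List (List Int)) (out : List Int) : Prop := out = get_dfs_sequence_alt start links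
instance (start : Int) (links : List (List Int)) (out : List Int) : Decidable (Spec_get_dfs_sequence start links out) := by unfold Spec_get_dfs_sequence; infer_instance

-- ===== CLAIM (what is proved, stated in full; the proofs are below) =====
def Claim_equal_get_dfs_sequence : Prop := ∀ (start : Int) (links : List (List Int)), Dom_get_dfs_sequence start links → Pre_get_dfs_sequence start links → Spec_get_dfs_sequence start links (get_dfs_sequence start links)

-- ===== LEMMAS AND PROOFS =====

-- scan-based chain step (proof-side reference)
def pvStepS (links : List (List Int)) (cur : Int) : Int :=
  match pvScanA cur links with
  | none => cur
  | some p => PySem.List.pyGetD p 1 0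

-- the tail of A's sequence after cur
def pvTailA (links : List (List Int)) : Nat → Int → List Int
  | 0, _ => []
  | fuel+1, cur =>
    match pvScanA cur links with
    | none => []
    | some p => PySem.List.pyGetD p 1 0 :: pvTailA links fuel (PySem.List.pyGetD p 1 0)

theorem pvLoopA_append (links : List (List Int)) :
    ∀ (fuel : Nat) (cur : Int) (seq : List Int),
      pvLoopA links fuel cur seq = seq ++ pvTailA links fuel cur := by
  intro fuel
  induction fuel with
  | zero => intro cur seq; simp [pvLoopA, pvTailA]
  | succ n ih =>
    intro cur seq
    simp only [pvLoopA, pvTailA]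
    cases pvScanA cur links with
    | none => simp
    | some p => simp [ih]

theorem pvScanA_eq_find? (cur : Int) (l : List (List Int)) :
    pvScanA cur l = l.find? (fun p => PySem.List.pyGetD p 0 0 == cur) := by
  induction l with
  | nil => rfl
  | cons p rest ih =>
    simp only [pvScanA, List.find?]
    by_cases h : PySem.List.pyGetD p 0 0 = cur
    · simp [h]
    · have hb : (PySem.List.pyGetD p 0 0 == cur) = false := by simpa using h
      simp [h, hb, ih]

theorem pvHead_eq (p : List Int) : PySem.List.pyGetD p 0 0 = p.headI := by
  rw [PySem.List.pyGetD_zero]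
  cases p <;> simp [List.headI]

theorem pvScanA_eq_first (cur : Int) (l : List (List Int)) :
    pvScanA cur l = pvFirstPre l cur := by
  induction l with
  | nil => rfl
  | cons p rest ih =>
    simp only [pvScanA, pvFirstPre, List.find?, pvHead_eq]
    by_cases h : p.headI = cur
    · simp [h]
    · have hb : (p.headI == cur) = false := by simpa using h
      rw [hb]
      simpa [pvFirstPre, h] using ih

-- scanning the peeled list is scanning the full list, as long as cur is unvisited
theorem pvScanA_filter (links : List (List Int)) (V : List Int) (cur : Int)
    (h : cur ∉ V) :
    pvScanA cur (links.filter (fun q => decide (PySem.List.pyGetD q 0 0 ∉ V))) =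
      pvScanA cur links := by
  induction links with
  | nil => rfl
  | cons p rest ih =>
    simp only [decide_not] at ih ⊢
    by_cases hv : PySem.List.pyGetD p 0 0 ∈ V
    · have hne : ¬ PySem.List.pyGetD p 0 0 = cur := fun he => h (he ▸ hv)
      simp [pvScanA, hv, hne, ih]
    · by_cases he : PySem.List.pyGetD p 0 0 = cur
      · simp [pvScanA, he, h]
      · simp [pvScanA, hv, he, ih]

theorem pvStepS_fix (links : List (List Int)) (c : Int)
    (h : pvScanA c links = none) : pvStepS links c = c := by
  simp [pvStepS, h]

theorem pvStepS_fix_iterate (links : List (List Int)) (c : Int) (m : Nat)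
    (h : pvScanA ((pvStepS links)^[m] c) links = none) :
    ∀ i, (pvStepS links)^[m + i] c = (pvStepS links)^[m] c := by
  intro i
  induction i with
  | zero => rfl
  | succ i ih =>
    rw [← Nat.add_assoc, Function.iterate_succ_apply', ih, pvStepS_fix links _ h]

theorem pvStepS_periodic (links : List (List Int)) (c : Int) (p : Nat)
    (h : (pvStepS links)^[p] c = c) : ∀ k, (pvStepS links)^[k * p] c = c := by
  intro k
  induction k with
  | zero => simp
  | succ k ih => rw [Nat.succ_mul, Function.iterate_add_apply, h]; exact ih

-- a node that still has a successor is never revisited, on a terminating chain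
theorem pvNoReturn (links : List (List Int)) (cur : Int) (p : List Int)
    (hs : pvScanA cur links = some p)
    (ht : ∃ m, pvScanA ((pvStepS links)^[m] cur) links = none) :
    ∀ j, (pvStepS links)^[j + 1] cur ≠ cur := by
  intro j hret
  obtain ⟨m, hm⟩ := ht
  have hper := pvStepS_periodic links cur (j + 1) hret m
  have hge : m ≤ m * (j + 1) := Nat.le_mul_of_pos_right m (Nat.succ_pos j)
  have hfix := pvStepS_fix_iterate links cur m hm (m * (j + 1) - m)
  rw [Nat.add_sub_cancel' hge] at hfix
  rw [hper] at hfix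
  rw [← hfix] at hm
  rw [hm] at hs
  simp at hs

-- MAIN: B on the peeled list computes cur followed by A's tail
theorem pvMain (links : List (List Int)) :
    ∀ (f : Nat) (V : List Int) (cur : Int),
      (∃ j, j ≤ f ∧ pvScanA ((pvStepS links)^[j] cur) links = none) →
      (∀ j, (pvStepS links)^[j] cur ∉ V) →
      get_dfs_sequence_alt cur
          (links.filter (fun q => decide (PySem.List.pyGetD q 0 0 ∉ V))) =
        cur :: pvTailA links f cur := by
  intro f
  induction f with
  | zero =>
    intro V cur h1 h2
    obtain ⟨j, hj, hn⟩ := h1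
    have hj0 : j = 0 := Nat.le_zero.mp hj
    subst hj0
    simp only [Function.iterate_zero, id_eq] at hn
    rw [get_dfs_sequence_alt]
    rw [← pvScanA_eq_find?, pvScanA_filter links V cur (h2 0), hn]
    simp [pvTailA]
  | succ f ih =>
    intro V cur h1 h2
    cases hscan : pvScanA cur links with
    | none =>
      rw [get_dfs_sequence_alt]
      rw [← pvScanA_eq_find?, pvScanA_filter links V cur (h2 0), hscan]
      simp [pvTailA, hscan]
    | some p =>
      rw [get_dfs_sequence_alt]
      rw [← pvScanA_eq_find?, pvScanA_filter links V cur (h2 0), hscan]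
      simp only [pvTailA, hscan]
      have hstep : pvStepS links cur = PySem.List.pyGetD p 1 0 := by
        simp [pvStepS, hscan]
      have hfilter :
          (links.filter (fun q => decide (PySem.List.pyGetD q 0 0 ∉ V))).filter
              (fun q => ¬ (PySem.List.pyGetD q 0 0 == cur)) =
            links.filter (fun q => decide (PySem.List.pyGetD q 0 0 ∉ cur :: V)) := by
        rw [List.filter_filter]
        apply List.filter_congr
        intro q _
        by_cases h1 : PySem.List.pyGetD q 0 0 ∈ V <;>
          by_cases h2 : PySem.List.pyGetD q 0 0 = cur <;> simp [h1, h2]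
      rw [hfilter]
      have h1' : ∃ j, j ≤ f ∧
          pvScanA ((pvStepS links)^[j] (PySem.List.pyGetD p 1 0)) links = none := by
        obtain ⟨j, hj, hn⟩ := h1
        cases j with
        | zero =>
          simp only [Function.iterate_zero, id_eq] at hn
          rw [hn] at hscan; simp at hscan
        | succ j =>
          refine ⟨j, Nat.lt_succ_iff.mp hj, ?_⟩
          rw [← hstep, ← Function.iterate_succ_apply]
          exact hn
      have h2' : ∀ j, (pvStepS links)^[j] (PySem.List.pyGetD p 1 0) ∉ cur :: V := by
        intro j
        have hiter : (pvStepS links)^[j] (PySem.List.pyGetD p 1 0) =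
            (pvStepS links)^[j + 1] cur := by
          rw [Function.iterate_succ_apply, hstep]
        simp only [List.mem_cons, not_or]
        constructor
        · rw [hiter]
          exact pvNoReturn links cur p hscan
            (h1.imp (fun j h => h.2)) j
        · rw [hiter]; exact h2 (j + 1)
      rw [ih (cur :: V) (PySem.List.pyGetD p 1 0) h1' h2']

-- under Pre_'s length condition, the spec step agrees with the scan step along the chain
theorem pvIterAgree (links : List (List Int)) (start : Int) (m : Nat)
    (hlen : ∀ i < m, ∀ p ∈ (pvFirstPre links ((pvStepPre links)^[i] start)).toList,
      2 ≤ p.length) :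
    ∀ j ≤ m, (pvStepS links)^[j] start = (pvStepPre links)^[j] start := by
  intro j
  induction j with
  | zero => intro _; rfl
  | succ j ih =>
    intro hj
    have ihj := ih (Nat.le_of_succ_le hj)
    rw [Function.iterate_succ_apply', Function.iterate_succ_apply', ihj]
    set x := (pvStepPre links)^[j] start with hx
    cases hf : pvFirstPre links x with
    | none =>
      have hs : pvScanA x links = none := by rw [pvScanA_eq_first, hf]
      simp [pvStepS, pvStepPre, hs, hf]
    | some p =>
      have hp : 2 ≤ p.length :=
        hlen j (Nat.lt_of_succ_le hj) p (by rw [hf]; simp)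
      have hs : pvScanA x links = some p := by rw [pvScanA_eq_first, hf]
      match p, hp with
      | a :: b :: rest, _ =>
        have hb1 : PySem.List.pyGetD (a :: b :: rest) 1 0 = b := by
          rw [show ((1 : Int)) = ((1 : Nat) : Int) by norm_num,
            PySem.List.pyGetD_natCast]
          rfl
        simp [pvStepS, pvStepPre, hs, hf, hb1]

-- ===== VERDICT (by name: the statement is the Claim_ definition above) =====
theorem get_dfs_sequence_spec : Claim_equal_get_dfs_sequence := by
  intro start links _ hpre
  obtain ⟨-, hlen, m, hmR, hmnone⟩ := hpre
  simp only [List.mem_range] at hmR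
  unfold Spec_get_dfs_sequence get_dfs_sequence
  have hlen' : ∀ i < m, ∀ p ∈ (pvFirstPre links ((pvStepPre links)^[i] start)).toList,
      2 ≤ p.length := by
    intro i hi p hp
    exact hlen i (List.mem_range.mpr (lt_trans hi hmR)) p hp
  have hagree := pvIterAgree links start m hlen'
  have h1 : ∃ j, j ≤ links.length + 1 ∧
      pvScanA ((pvStepS links)^[j] start) links = none := by
    refine ⟨m, Nat.le_of_lt hmR, ?_⟩
    rw [hagree m le_rfl, pvScanA_eq_first, hmnone]
  have h2 : ∀ j, (pvStepS links)^[j] start ∉ ([] : List Int) := by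
    intro j; exact List.not_mem_nil
  have hmain := pvMain links (links.length + 1) [] start h1 h2
  have hfl : links.filter
      (fun q => decide (PySem.List.pyGetD q 0 0 ∉ ([] : List Int))) = links := by
    simp
  rw [hfl] at hmain
  rw [hmain, pvLoopA_append]
  simp
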